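-- pv_equiv track=rewrite | github.com/OpenPecha/rag_prep_tool | src/rag_prep_tool/preprocessing/clean_text.py | replace_double_quotes
-- ===== SOURCE A (Python) =====
-- def replace_double_quotes(text:str)->str:
--     """ replaces double quotes with < and >"""
--     result = []
--     quote_count = 0
--     for char in text:
--         if char == '"':
--             quote_count += 1
--             if quote_count % 2 == 1:
--                 result.append('<')
--             else:
--                 result.append('>')
--         else:
--             result.append(char)
--     return ''.join(result)
-- ===== SOURCE B (Python) =====
-- def replace_double_quotes(text: str) -> str:
--     parts = text.split('"')
--     out = [parts[0]]
--     for i, seg in enumerate(parts[1:], 1):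
--         out.append('<' if i % 2 else '>')
--         out.append(seg)
--     return ''.join(out)
-- ===== Notes on version B (the rewrite author's own statement) =====
-- stated objective: faster
-- what changed: Splits the text once on the double-quote character and rejoins the segments with an opening or closing angle bracket chosen by segment-index parity, replacing the per-character scan with quote-parity state; a timing run measured B faster by a constant factor (str.split/join vs a Python-level char loop).
import Mathlib
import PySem

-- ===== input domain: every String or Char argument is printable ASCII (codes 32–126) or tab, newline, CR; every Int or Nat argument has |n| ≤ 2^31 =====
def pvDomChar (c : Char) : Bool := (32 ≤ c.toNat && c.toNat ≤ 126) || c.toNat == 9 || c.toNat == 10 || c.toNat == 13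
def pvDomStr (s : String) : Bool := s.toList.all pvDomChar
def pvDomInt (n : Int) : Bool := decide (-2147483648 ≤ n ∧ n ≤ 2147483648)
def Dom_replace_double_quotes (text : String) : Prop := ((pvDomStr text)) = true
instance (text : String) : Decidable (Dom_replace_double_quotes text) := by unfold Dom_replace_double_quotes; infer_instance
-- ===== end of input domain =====

-- B replaces A's per-character scan with quote-parity state by one split on '"'
-- and a rejoin with separators chosen by segment-index parity (measured faster by a constant factor).

-- ===== PORT A =====
def replace_double_quotes (text : String) : String :=
  let r := text.toList.foldl
    (fun (st : List Char × Nat) c =>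
      if c = '"' then
        let q := st.2 + 1
        if q % 2 = 1 then (st.1 ++ ['<'], q) else (st.1 ++ ['>'], q)
      else (st.1 ++ [c], st.2))
    ([], 0)
  String.ofList r.1

-- ===== PORT B =====
def replace_double_quotes_alt (text : String) : String :=
  let parts := PySem.Chars.splitOn text.toList ['"']
  let out := parts.tail.foldl
    (fun (st : List Char × Nat) seg =>
      (st.1 ++ (if st.2 % 2 = 1 then ['<'] else ['>']) ++ seg, st.2 + 1))
    (parts.headD [], 1)
  String.ofList out.1

-- ===== PRECONDITION & SPEC =====
def Spec_replace_double_quotes (text : String) (out : String) : Prop := out = replace_double_quotes_alt text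
instance (text : String) (out : String) : Decidable (Spec_replace_double_quotes text out) := by unfold Spec_replace_double_quotes; infer_instance

-- ===== CLAIM (what is proved, stated in full; the proofs are below) =====
def Claim_equal_replace_double_quotes : Prop := ∀ (text : String), Dom_replace_double_quotes text → Spec_replace_double_quotes text (replace_double_quotes text)

-- ===== LEMMAS AND PROOFS =====

-- prepend `pre` to the head of a segment list
def preH (pre : List Char) : List (List Char) → List (List Char)
  | [] => [pre]
  | p :: ps => (pre ++ p) :: ps

-- structural recursion equivalent of split on '"'
def simpleSplit : List Char → List (List Char)
  | [] => [[]]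
  | c :: cs => if c = '"' then [] :: simpleSplit cs else preH [c] (simpleSplit cs)

lemma simpleSplit_ne_nil (cs : List Char) : simpleSplit cs ≠ [] := by
  cases cs with
  | nil => simp [simpleSplit]
  | cons c cs =>
    simp only [simpleSplit]
    split
    · simp
    · cases h : simpleSplit cs <;> simp [preH]

lemma preH_nil (ss : List (List Char)) (h : ss ≠ []) : preH [] ss = ss := by
  cases ss with
  | nil => exact absurd rfl h
  | cons p ps => simp [preH]

lemma go_spec (l : List Char) (fuel : Nat) (cur : List Char) (acc : List (List Char))
    (h : l.length < fuel) :
    PySem.Chars.splitOn.go ['"'] fuel l cur acc = acc.reverse ++ preH cur.reverse (simpleSplit l) := by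
  induction l generalizing fuel cur acc with
  | nil =>
    cases fuel with
    | zero => omega
    | succ f => simp [PySem.Chars.splitOn.go, simpleSplit, preH]
  | cons c cs ih =>
    cases fuel with
    | zero => omega
    | succ f =>
      rw [PySem.Chars.splitOn.go]
      by_cases hc : c = '"'
      · subst hc
        simp only [List.isPrefixOf] at *
        rw [if_pos (by simp)]
        simp only [List.length_cons, List.length_nil, List.drop_succ_cons, List.drop_zero]
        rw [ih f [] (cur.reverse :: acc) (by simp at h; omega)]
        simp only [List.reverse_nil]
        rw [preH_nil _ (simpleSplit_ne_nil cs)]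
        simp [simpleSplit, preH]
      · rw [if_neg (by simp [List.isPrefixOf]; exact fun h => hc h.symm)]
        rw [ih f (c :: cur) acc (by simp at h ⊢; omega)]
        simp only [simpleSplit, if_neg hc]
        cases hss : simpleSplit cs with
        | nil => exact absurd hss (simpleSplit_ne_nil cs)
        | cons p ps => simp [preH]

lemma splitOn_eq_simpleSplit (cs : List Char) :
    PySem.Chars.splitOn cs ['"'] = simpleSplit cs := by
  rw [PySem.Chars.splitOn, go_spec cs (cs.length + 1) [] [] (by omega)]
  simp [preH_nil _ (simpleSplit_ne_nil cs)]

-- the intended output of the scan, starting with `q` quotes already seen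
def render (q : Nat) : List Char → List Char
  | [] => []
  | c :: cs =>
    if c = '"' then (if (q + 1) % 2 = 1 then '<' else '>') :: render (q + 1) cs
    else c :: render q cs

-- the separators-and-segments tail, with index `i` for the next separator
def mid (i : Nat) : List (List Char) → List Char
  | [] => []
  | p :: ps => (if i % 2 = 1 then '<' else '>') :: (p ++ mid (i + 1) ps)

lemma foldA_eq_render (cs : List Char) (acc : List Char) (q : Nat) :
    (cs.foldl
      (fun (st : List Char × Nat) c =>
        if c = '"' then
          let q := st.2 + 1
          if q % 2 = 1 then (st.1 ++ ['<'], q) else (st.1 ++ ['>'], q)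
        else (st.1 ++ [c], st.2))
      (acc, q)).1 = acc ++ render q cs := by
  induction cs generalizing acc q with
  | nil => simp [render]
  | cons c cs ih =>
    by_cases hc : c = '"'
    · subst hc
      simp only [List.foldl_cons, render]
      by_cases hq : (q + 1) % 2 = 1
      · rw [if_pos hq]; simp only [if_pos hq, ih]; simp
      · rw [if_neg hq]; simp only [if_neg hq, ih]; simp
    · simp only [List.foldl_cons, if_neg hc, render, ih]; simp

lemma foldB_eq_mid (ps : List (List Char)) (acc : List Char) (i : Nat) :
    (ps.foldl
      (fun (st : List Char × Nat) seg =>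
        (st.1 ++ (if st.2 % 2 = 1 then ['<'] else ['>']) ++ seg, st.2 + 1))
      (acc, i)).1 = acc ++ mid i ps := by
  induction ps generalizing acc i with
  | nil => simp [mid]
  | cons p ps ih =>
    simp only [List.foldl_cons, mid, ih]
    by_cases hi : i % 2 = 1 <;> simp [hi]

lemma render_eq_split (cs : List Char) (q : Nat) :
    render q cs = (simpleSplit cs).headD [] ++ mid (q + 1) (simpleSplit cs).tail := by
  induction cs generalizing q with
  | nil => simp [render, simpleSplit, mid]
  | cons c cs ih =>
    by_cases hc : c = '"'
    · subst hc
      cases hss : simpleSplit cs with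
      | nil => exact absurd hss (simpleSplit_ne_nil cs)
      | cons p ps =>
        simp [render, simpleSplit, mid, ih (q + 1), hss]
    · cases hss : simpleSplit cs with
      | nil => exact absurd hss (simpleSplit_ne_nil cs)
      | cons p ps =>
        simp [render, simpleSplit, preH, hc, ih q, hss]

-- ===== VERDICT (by name: the statement is the Claim_ definition above) =====
theorem replace_double_quotes_spec : Claim_equal_replace_double_quotes := by
  intro text _
  unfold Spec_replace_double_quotes replace_double_quotes replace_double_quotes_alt
  simp only [splitOn_eq_simpleSplit, foldA_eq_render, foldB_eq_mid, List.nil_append]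
  rw [render_eq_split]
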